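-- pv_equiv track=rewrite | github.com/MarkPreschern/Semi-Supervised-Rotten-Tomatoes | src/Lemmatizer.py | removeStopCharacters
-- ===== SOURCE A (Python) =====
-- def removeStopCharacters(sentence):
--     stopCharacters = ['.', ',', '!', '?', '\"', '\'', '[', ']', ';', '~', '\\', '/', '`']
--     for stopCharacter in stopCharacters:
--         sentence = sentence.replace(stopCharacter, "")
--     sentence = sentence.replace("  ", " ")  # removes extra whitespace
--     sentence = sentence.strip() # removes trailing and leading whitespace
--     sentence = sentence.lower() # makes the sentence all lowercase
--     return sentence
-- ===== SOURCE B (Python) =====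
-- def removeStopCharacters(sentence):
--     stopset = {'.', ',', '!', '?', '"', "'", '[', ']', ';', '~', '\\', '/', '`'}
--     cleaned = ''.join(c for c in sentence if c not in stopset)
--     return cleaned.replace('  ', ' ').strip().lower()
-- ===== Notes on version B (the rewrite author's own statement) =====
-- stated objective: simpler
-- what changed: Replaces the 13 successive full-string replace passes with one character-wise filter against a set of stop characters, then the same double-space collapse, strip and lowercase.
import Mathlib
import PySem

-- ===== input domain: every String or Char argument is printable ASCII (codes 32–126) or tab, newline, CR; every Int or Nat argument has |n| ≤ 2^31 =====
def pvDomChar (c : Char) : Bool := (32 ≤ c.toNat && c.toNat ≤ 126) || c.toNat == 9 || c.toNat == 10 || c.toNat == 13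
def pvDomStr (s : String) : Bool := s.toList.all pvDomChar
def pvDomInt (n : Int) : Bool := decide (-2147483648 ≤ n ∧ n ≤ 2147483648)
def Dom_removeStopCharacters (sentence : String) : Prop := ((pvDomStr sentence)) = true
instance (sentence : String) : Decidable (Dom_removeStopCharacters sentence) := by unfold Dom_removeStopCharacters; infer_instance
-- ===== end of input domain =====

-- B replaces A's thirteen successive full-string replace passes by one character-wise
-- filter against a set of the stop characters (objective: simpler, one pass).

-- ===== PORT A =====
def removeStopCharacters (sentence : String) : String :=
  let stopCharacters : List String := [".", ",", "!", "?", "\"", "'", "[", "]", ";", "~", "\\", "/", "`"]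
  let s1 := stopCharacters.foldl (fun s stopCharacter => PySem.Str.replace s stopCharacter "") sentence
  let s2 := PySem.Str.replace s1 "  " " "   -- removes extra whitespace
  let s3 := PySem.Str.strip s2              -- removes trailing and leading whitespace
  PySem.Str.lower s3                        -- makes the sentence all lowercase

-- ===== PORT B =====
def pvStopSet : PySem.Set Char :=
  PySem.Set.ofList ['.', ',', '!', '?', '"', '\'', '[', ']', ';', '~', '\\', '/', '`']

def removeStopCharacters_alt (sentence : String) : String :=
  let cleaned := String.ofList (sentence.toList.filter (fun c => !(PySem.Set.contains pvStopSet c)))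
  PySem.Str.lower (PySem.Str.strip (PySem.Str.replace cleaned "  " " "))

-- ===== PRECONDITION & SPEC =====
def Spec_removeStopCharacters (sentence : String) (out : String) : Prop := out = removeStopCharacters_alt sentence
instance (sentence : String) (out : String) : Decidable (Spec_removeStopCharacters sentence out) := by unfold Spec_removeStopCharacters; infer_instance

-- ===== CLAIM =====
def Claim_equal_removeStopCharacters : Prop := ∀ (sentence : String), Dom_removeStopCharacters sentence → Spec_removeStopCharacters sentence (removeStopCharacters sentence)

-- ===== LEMMAS AND PROOFS =====

-- replace.go with a single-character pattern and empty replacement filters that character out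
lemma replace_go_single (c0 : Char) (fuel : Nat) (l acc : List Char)
    (h : l.length ≤ fuel) :
    PySem.Chars.replace.go [c0] [] fuel l acc = acc.reverse ++ l.filter (fun c => !(c == c0)) := by
  induction fuel generalizing l acc with
  | zero =>
    have hl : l = [] := List.length_eq_zero_iff.mp (Nat.le_zero.mp h)
    simp [hl, PySem.Chars.replace.go]
  | succ fuel ih =>
    cases l with
    | nil => simp [PySem.Chars.replace.go]
    | cons c t =>
      rw [PySem.Chars.replace.go]
      have ht : t.length ≤ fuel := by simpa using h
      by_cases hc : c0 = c
      · subst hc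
        simp only [List.isPrefixOf, beq_self_eq_true, Bool.true_and,
          if_true, List.length_singleton, List.drop_succ_cons, List.drop_zero, List.reverse_nil,
          List.nil_append]
        rw [ih t acc ht]
        simp
      · have hpre : List.isPrefixOf [c0] (c :: t) = false := by
          simp [List.isPrefixOf, hc]
        rw [hpre]
        simp only [if_false, Bool.false_eq_true]
        rw [ih t (c :: acc) ht]
        have : (c == c0) = false := by
          simp [beq_eq_false_iff_ne]; exact fun e => hc e.symm
        simp [this]

-- replacing one single character by "" is exactly filtering it out
lemma replace_single (c0 : Char) (l : List Char) :
    PySem.Chars.replace l [c0] [] = l.filter (fun c => !(c == c0)) := by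
  simp [PySem.Chars.replace, replace_go_single c0 l.length l [] le_rfl]

-- A's thirteen replace passes equal B's one filter pass
lemma stage1_eq (s : String) :
    ([".", ",", "!", "?", "\"", "'", "[", "]", ";", "~", "\\", "/", "`"] : List String).foldl
        (fun s stopCharacter => PySem.Str.replace s stopCharacter "") s
      = String.ofList (s.toList.filter (fun c => !(PySem.Set.contains pvStopSet c))) := by
  simp only [List.foldl, PySem.Str.replace]
  simp only [String.toList_ofList]
  simp
  rw [replace_single, replace_single, replace_single, replace_single, replace_single,
    replace_single, replace_single, replace_single, replace_single, replace_single,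
    replace_single, replace_single, replace_single]
  simp only [List.filter_filter]
  congr 1
  apply List.filter_congr
  intro c _
  simp [pvStopSet, PySem.Set.ofList, beq_eq_decide]
  ac_rfl

-- ===== VERDICT =====
theorem removeStopCharacters_spec : Claim_equal_removeStopCharacters := by
  intro sentence _
  unfold Spec_removeStopCharacters removeStopCharacters removeStopCharacters_alt
  exact congrArg (fun t => PySem.Str.lower (PySem.Str.strip (PySem.Str.replace t "  " " ")))
    (stage1_eq sentence)
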